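-- pv_equiv track=rewrite | github.com/ParkHyeLim/AlgorithmStudy | DynamicProgramming/problem2775_부녀회장이 될거야/hyerim.py | dynamic_calculation
-- ===== SOURCE A (Python) =====
-- def dynamic_calculation(floor, number):
--
--     # 메모이제이션 테이블 초기화
--     people = [[0]*(number+1) for _ in range(floor+1)]
--
--     # 기저 조건 설정
--     for i in range(1, number+1):
--         people[0][i] = i
--
--     # 하위 문제 해결
--     for i in range(1, floor+1):
--         underfloor = 0
--         for j in range(1, number+1):
--             underfloor += people[i-1][j]
--             people[i][j] = underfloor
--
--     return people[floor][number]
-- ===== SOURCE B (Python) =====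
-- def dynamic_calculation(floor, number):
--     # Residents on `floor` in room `number` = C(floor + number, floor + 1),
--     # computed by a single multiplicative pass (each partial product is an
--     # exact binomial coefficient, so the floor division is exact).
--     result = 1
--     for k in range(1, floor + 2):
--         result = result * (number - 1 + k) // k
--     return result
-- ===== Notes on version B (the rewrite author's own statement) =====
-- stated objective: faster
-- what changed: Replaces the (floor+1) x (number+1) prefix-sum DP table with a closed-form binomial coefficient C(floor+number, floor+1) computed by one multiplicative loop of floor+1 exact divisions.
import Mathlib
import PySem

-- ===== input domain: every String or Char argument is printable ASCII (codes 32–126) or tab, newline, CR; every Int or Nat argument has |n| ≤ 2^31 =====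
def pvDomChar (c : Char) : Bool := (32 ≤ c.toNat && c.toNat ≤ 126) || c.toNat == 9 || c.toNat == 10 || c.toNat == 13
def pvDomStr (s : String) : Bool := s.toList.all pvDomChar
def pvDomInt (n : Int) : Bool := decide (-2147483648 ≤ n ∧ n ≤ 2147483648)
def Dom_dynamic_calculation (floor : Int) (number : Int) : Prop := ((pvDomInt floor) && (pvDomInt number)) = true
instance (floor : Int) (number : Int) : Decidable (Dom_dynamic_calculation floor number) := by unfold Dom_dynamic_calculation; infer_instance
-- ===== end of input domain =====

-- B replaces A's prefix-sum DP table by a single multiplicative loop computing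
-- the closed form C(floor+number, floor+1) with exact integer divisions.

-- ===== PORT A =====
-- A's inner loop over j: underfloor += people[i-1][j]; people[i][j] = underfloor
-- (the running prefix sum over the previous row, as structural recursion)
def pvPrefix (acc : Int) : List Int → List Int
  | [] => []
  | x :: xs => (acc + x) :: pvPrefix (acc + x) xs

def dynamic_calculation (floor : Int) (number : Int) : Int :=
  -- people[0] after the base-condition loop: [0, 1, ..., number]
  let row0 : List Int := 0 :: PySem.List.pyRange 1 (number + 1) 1
  -- the floor loop: each row i is built from row i-1 (rows kept one at a time)
  let last := (PySem.List.pyRange 1 (floor + 1) 1).foldl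
      (fun row _ => 0 :: pvPrefix 0 row.tail) row0
  -- people[floor][number]; Python raises IndexError where pyGet? is none (outside Pre_)
  (PySem.List.pyGet? last number).getD 0

-- ===== PORT B =====
def dynamic_calculation_alt (floor : Int) (number : Int) : Int :=
  (PySem.List.pyRange 1 (floor + 2) 1).foldl
    (fun result k => PySem.Int.floordiv (result * (number - 1 + k)) k) 1

-- ===== PRECONDITION & SPEC =====
-- A raises IndexError whenever floor < 0 or number < 0 (the table is empty or too short).
def Pre_dynamic_calculation (floor : Int) (number : Int) : Prop := 0 ≤ floor ∧ 0 ≤ number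
instance (floor : Int) (number : Int) : Decidable (Pre_dynamic_calculation floor number) := by
  unfold Pre_dynamic_calculation; infer_instance

def pvWitness_dynamic_calculation : Int × Int := (2, 3)

def Spec_dynamic_calculation (floor : Int) (number : Int) (out : Int) : Prop := out = dynamic_calculation_alt floor number
instance (floor : Int) (number : Int) (out : Int) : Decidable (Spec_dynamic_calculation floor number out) := by unfold Spec_dynamic_calculation; infer_instance

-- ===== CLAIM (what is proved, stated in full; the proofs are below) =====
def Claim_equal_dynamic_calculation : Prop := ∀ (floor : Int) (number : Int), Dom_dynamic_calculation floor number → Pre_dynamic_calculation floor number → Spec_dynamic_calculation floor number (dynamic_calculation floor number)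

-- ===== LEMMAS AND PROOFS =====

-- Row f of A's table: people[f][j] = C(f+j, f+1) (hockey-stick invariant).
def pvRowA (f n : Nat) : List Int :=
  (List.range (n + 1)).map (fun j => ((Nat.choose (f + j) (f + 1) : Nat) : Int))

theorem pvPrefix_choose (f : Nat) : ∀ (m t : Nat),
    pvPrefix ((Nat.choose (f + t) (f + 2) : Nat) : Int)
      ((List.range m).map (fun j => ((Nat.choose (f + t + j) (f + 1) : Nat) : Int)))
    = (List.range m).map (fun j => ((Nat.choose (f + t + j + 1) (f + 2) : Nat) : Int)) := by
  intro m
  induction m with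
  | zero => intro t; simp [pvPrefix]
  | succ m ih =>
    intro t
    rw [List.range_succ_eq_map]
    simp only [List.map_cons, List.map_map, Nat.add_zero]
    rw [pvPrefix]
    have hp : Nat.choose (f + t + 1) (f + 2)
        = Nat.choose (f + t) (f + 1) + Nat.choose (f + t) (f + 2) := by
      simpa [Nat.add_assoc] using Nat.choose_succ_succ (f + t) (f + 1)
    have hsum : ((Nat.choose (f + t) (f + 2) : Nat) : Int) + ((Nat.choose (f + t) (f + 1) : Nat) : Int)
        = ((Nat.choose (f + t + 1) (f + 2) : Nat) : Int) := by
      rw [hp]; push_cast; ring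
    rw [hsum]
    simp only [Function.comp_def, Nat.succ_eq_add_one]
    have ih' := ih (t + 1)
    have harg2 : ∀ j : Nat, f + t + 1 + j = f + t + (j + 1) := fun j => by omega
    simp only [show f + (t + 1) = f + t + 1 from rfl, harg2] at ih'
    exact congrArg (List.cons _) ih'

theorem pvRow0_eq (n : Nat) :
    (0 : Int) :: PySem.List.pyRange 1 ((n : Int) + 1) 1 = pvRowA 0 n := by
  simp only [pvRowA, List.range_succ_eq_map, List.map_cons, List.map_map, Function.comp_def,
    Nat.succ_eq_add_one, Nat.zero_add, Nat.choose_one_right, PySem.List.pyRange_one]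
  norm_num
  intro a _
  omega

theorem pvA_step (f n : Nat) :
    (0 : Int) :: pvPrefix 0 (pvRowA f n).tail = pvRowA (f + 1) n := by
  have htail : (pvRowA f n).tail
      = (List.range n).map (fun j => ((Nat.choose (f + 1 + j) (f + 1) : Nat) : Int)) := by
    simp only [pvRowA, List.range_succ_eq_map, List.map_cons, List.map_map, Function.comp_def,
      Nat.succ_eq_add_one, List.tail_cons]
    apply List.map_congr_left
    intro j _
    rw [show f + (j + 1) = f + 1 + j from by omega]
  have h0 : (0 : Int) = ((Nat.choose (f + 1) (f + 2) : Nat) : Int) := by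
    rw [Nat.choose_eq_zero_of_lt (by omega)]; rfl
  have hc := pvPrefix_choose f n 1
  rw [htail, h0, hc]
  simp only [pvRowA, List.range_succ_eq_map, List.map_cons, List.map_map, Function.comp_def,
    Nat.succ_eq_add_one, Nat.add_zero]
  refine congrArg (List.cons _) (List.map_congr_left ?_)
  intro j _
  congr 2

theorem pvA_rows (n : Nat) : ∀ (f : Nat),
    (PySem.List.pyRange 1 ((f : Int) + 1) 1).foldl
      (fun row _ => 0 :: pvPrefix 0 row.tail) (pvRowA 0 n) = pvRowA f n := by
  intro f
  induction f with
  | zero => simp [PySem.List.pyRange_one_eq_nil]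
  | succ f ih =>
    rw [show (((f + 1 : Nat) : Int) + 1) = ((f : Int) + 1) + 1 from by push_cast; ring,
      PySem.List.pyRange_one_succ_right (by omega), List.foldl_append, ih]
    simp only [List.foldl_cons, List.foldl_nil]
    exact pvA_step f n

theorem pvA_value (f n : Nat) :
    ((PySem.List.pyGet?
        ((PySem.List.pyRange 1 ((f : Int) + 1) 1).foldl
          (fun row _ => 0 :: pvPrefix 0 row.tail)
          ((0 : Int) :: PySem.List.pyRange 1 ((n : Int) + 1) 1)) (n : Int)).getD 0)
    = ((Nat.choose (f + n) (f + 1) : Nat) : Int) := by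
  rw [pvRow0_eq, pvA_rows n f]
  rw [PySem.List.pyGet?_natCast]
  simp [pvRowA]

theorem pvB_value (n : Nat) : ∀ (K : Nat),
    (PySem.List.pyRange 1 ((K : Int) + 1) 1).foldl
      (fun r k => PySem.Int.floordiv (r * ((n : Int) - 1 + k)) k) 1
    = ((Nat.choose (n + K - 1) K : Nat) : Int) := by
  intro K
  induction K with
  | zero => simp [PySem.List.pyRange_one_eq_nil]
  | succ K ih =>
    have hsplit : PySem.List.pyRange 1 (((K + 1 : Nat) : Int) + 1) 1
        = PySem.List.pyRange 1 ((K : Int) + 1) 1 ++ [(K : Int) + 1] := by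
      rw [show (((K + 1 : Nat) : Int) + 1) = ((K : Int) + 1) + 1 from by push_cast; ring]
      exact PySem.List.pyRange_one_succ_right (by omega)
    rw [hsplit, List.foldl_append, ih]
    simp only [List.foldl_cons, List.foldl_nil]
    by_cases h0 : n + K = 0
    · obtain ⟨hn, hK⟩ : n = 0 ∧ K = 0 := by omega
      subst hn; subst hK; decide
    · have key : Nat.choose (n + K - 1) K * (n + K) = Nat.choose (n + K) (K + 1) * (K + 1) := by
        have h := Nat.add_one_mul_choose_eq (n + K - 1) K
        rw [show n + K - 1 + 1 = n + K from by omega] at h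
        rw [mul_comm]; exact h
      have harg : ((n : Int) - 1 + ((K : Int) + 1)) = ((n + K : Nat) : Int) := by push_cast; ring
      rw [harg, ← Int.natCast_mul, key, Int.natCast_mul,
        show ((K : Int) + 1) = ((K + 1 : Nat) : Int) from by push_cast; ring,
        ← Int.natCast_mul, PySem.Int.floordiv_natCast, Nat.mul_div_cancel _ (by omega)]
      rw [show n + (K + 1) - 1 = n + K from by omega]

-- ===== VERDICT (by name: the statement is the Claim_ definition above) =====
theorem dynamic_calculation_spec : Claim_equal_dynamic_calculation := by
  intro floor number _ hpre
  obtain ⟨hf, hn⟩ := hpre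
  obtain ⟨f, rfl⟩ := Int.eq_ofNat_of_zero_le hf
  obtain ⟨n, rfl⟩ := Int.eq_ofNat_of_zero_le hn
  unfold Spec_dynamic_calculation dynamic_calculation_alt
  have hb := pvB_value n (f + 1)
  rw [show ((f : Int) + 2) = ((f + 1 : Nat) : Int) + 1 from by push_cast; ring, hb]
  show (PySem.List.pyGet? _ _).getD 0 = _
  rw [pvA_value f n]
  have h : n + (f + 1) - 1 = f + n := by omega
  rw [h]
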